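-- pv_equiv track=rewrite | github.com/rodinVasiliy/kmzi_lab2 | main.py | lfsr3
-- ===== SOURCE A (Python) =====
-- def lfsr3(n):
--     flag = 0
--     period = 0
--     cnt = 0
--     start_state = 0b00101001
--     state = 0b00101001
--     lst = list()
--     lst.append(state & 1)
--     while(cnt < n):
--         newbit = ((state >> 7) ^ (state >> 5) ^ (state >> 1) ^ state) & 1
--         state = (state >> 1) | (newbit << 6)
--         lst.append(state & 1)
--         cnt += 1
--         if start_state == state and flag == 0:
--             flag = 1
--             period = cnt
--     string = "".join(map(str, lst))
--     return lst, string, period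
-- ===== SOURCE B (Python) =====
-- def _step(state):
--     newbit = ((state >> 7) ^ (state >> 5) ^ (state >> 1) ^ state) & 1
--     return (state >> 1) | (newbit << 6)
--
-- def lfsr3(n):
--     start = 0b00101001
--     state = start
--     states = [state]
--     for _ in range(n):
--         state = _step(state)
--         states.append(state)
--     bits = [s & 1 for s in states]
--     string = "".join(map(str, bits))
--     try:
--         period = states.index(start, 1)
--     except ValueError:
--         period = 0
--     return bits, string, period
-- ===== Notes on version B (the rewrite author's own statement) =====
-- stated objective: alternative
-- what changed: B builds the full list of LFSR states with a plain stepping loop and then derives the bits, the string, and the period by separate passes (a map/join and an index search for the first reoccurrence of the start state), replacing A's inline flag-guarded period detection inside the generation loop.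
import Mathlib
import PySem

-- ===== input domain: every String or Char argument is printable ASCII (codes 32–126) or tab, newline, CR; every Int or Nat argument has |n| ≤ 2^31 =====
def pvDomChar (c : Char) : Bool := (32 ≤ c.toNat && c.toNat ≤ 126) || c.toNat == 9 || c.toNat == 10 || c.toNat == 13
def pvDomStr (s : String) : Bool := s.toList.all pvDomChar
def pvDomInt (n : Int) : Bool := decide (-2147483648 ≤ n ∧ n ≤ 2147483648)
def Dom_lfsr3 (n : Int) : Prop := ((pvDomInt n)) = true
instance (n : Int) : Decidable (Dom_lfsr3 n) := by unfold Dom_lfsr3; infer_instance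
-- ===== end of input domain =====

-- B replaces A's in-loop flag-guarded period detection by building the state list first and then
-- deriving bits/string/period in separate passes (alternative decomposition, same cost).

-- ===== PORT A =====
-- A's while loop (cnt from 0 while cnt < n, cnt += 1 each pass) runs exactly n.toNat times; the
-- fuel is that count and cnt is carried explicitly, state/lst/flag/period exactly as in Python.
def lfsr3Loop (fuel : Nat) (cnt state : Int) (lst : List Int) (flag period : Int) :
    List Int × Int :=
  match fuel with
  | 0 => (lst, period)
  | f + 1 =>
    let newbit := PySem.Int.band
      (PySem.Int.bxor (PySem.Int.bxor (PySem.Int.bxor (state >>> 7) (state >>> 5)) (state >>> 1)) state) 1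
    let state' := PySem.Int.bor (state >>> 1) (newbit <<< 6)
    let lst' := lst ++ [PySem.Int.band state' 1]
    let cnt' := cnt + 1
    if 41 == state' && flag == 0 then
      lfsr3Loop f cnt' state' lst' 1 cnt'
    else
      lfsr3Loop f cnt' state' lst' flag period

def lfsr3 (n : Int) : List Int × String × Int :=
  let state : Int := 41  -- 0b00101001
  let lst : List Int := [PySem.Int.band state 1]
  let r := lfsr3Loop n.toNat 0 state lst 0 0
  let string := String.join (r.1.map PySem.Int.toStr)  -- "".join(map(str, lst))
  (r.1, string, r.2)

-- ===== PORT B =====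
def lfsr3Step (state : Int) : Int :=
  let newbit := PySem.Int.band
    (PySem.Int.bxor (PySem.Int.bxor (PySem.Int.bxor (state >>> 7) (state >>> 5)) (state >>> 1)) state) 1
  PySem.Int.bor (state >>> 1) (newbit <<< 6)

-- states = [start]; for _ in range(n): state = _step(state); states.append(state)
def lfsr3States (fuel : Nat) (state : Int) : List Int :=
  match fuel with
  | 0 => [state]
  | f + 1 => state :: lfsr3States f (lfsr3Step state)

def lfsr3_alt (n : Int) : List Int × String × Int :=
  let start : Int := 41
  let states := lfsr3States n.toNat start
  let bits := states.map (fun s => PySem.Int.band s 1)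
  let string := String.join (bits.map PySem.Int.toStr)
  -- states.index(start, 1): first absolute index ≥ 1 of start, = 1 + its index in the tail
  -- (exact: the search starting at index 1 never inspects states[0]); ValueError ↦ period = 0
  let period : Int :=
    match PySem.List.index? (states.drop 1) start with
    | some j => (j : Int) + 1
    | none => 0
  (bits, string, period)

-- ===== PRECONDITION & SPEC =====
def Spec_lfsr3 (n : Int) (out : List Int × String × Int) : Prop := out = lfsr3_alt n
instance (n : Int) (out : List Int × String × Int) : Decidable (Spec_lfsr3 n out) := by unfold Spec_lfsr3; infer_instance

-- ===== CLAIM (what is proved, stated in full; the proofs are below) =====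
def Claim_equal_lfsr3 : Prop := ∀ (n : Int), Dom_lfsr3 n → Spec_lfsr3 n (lfsr3 n)

-- ===== LEMMAS AND PROOFS =====

-- every state list is its head followed by its tail
theorem lfsr3States_cons (f : Nat) (s : Int) :
    lfsr3States f s = s :: (lfsr3States f s).drop 1 := by
  cases f <;> simp [lfsr3States]

theorem lfsr3States_drop_succ (f : Nat) (s : Int) :
    (lfsr3States (f + 1) s).drop 1 = lfsr3States f (lfsr3Step s) := rfl

-- A's loop body performs exactly one lfsr3Step
theorem lfsr3Loop_succ (g : Nat) (cnt s : Int) (lst : List Int) (flag period : Int) :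
    lfsr3Loop (g + 1) cnt s lst flag period =
      if 41 == lfsr3Step s && flag == 0 then
        lfsr3Loop g (cnt + 1) (lfsr3Step s) (lst ++ [PySem.Int.band (lfsr3Step s) 1]) 1 (cnt + 1)
      else
        lfsr3Loop g (cnt + 1) (lfsr3Step s) (lst ++ [PySem.Int.band (lfsr3Step s) 1]) flag period := by
  simp only [lfsr3Loop, lfsr3Step]

-- The key invariant: A's loop appends the low bits of the successive states to lst, and its
-- flag/period bookkeeping computes, when flag = 0, the first reoccurrence index of 41 offset by cnt.
theorem lfsr3Loop_eq (f : Nat) :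
    ∀ (cnt s : Int) (lst : List Int) (flag period : Int),
    lfsr3Loop f cnt s lst flag period =
      (lst ++ ((lfsr3States f s).drop 1).map (fun x => PySem.Int.band x 1),
       if flag == 0 then
         match PySem.List.index? ((lfsr3States f s).drop 1) 41 with
         | some j => cnt + (j : Int) + 1
         | none => period
       else period) := by
  induction f with
  | zero =>
    intro cnt s lst flag period
    simp only [lfsr3Loop, lfsr3States, List.drop_succ_cons, List.drop_nil, List.map_nil,
      List.append_nil, PySem.List.index?]
    cases h : (flag == 0) <;> simp
  | succ g ih =>
    intro cnt s lst flag period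
    rw [lfsr3Loop_succ, lfsr3States_drop_succ,
        lfsr3States_cons g (lfsr3Step s)]
    by_cases hs : lfsr3Step s = 41
    · by_cases hf : flag = 0
      · subst hf
        rw [if_pos (by simp [hs]), ih, hs, PySem.List.index?_cons_self]
        simp
      · rw [if_neg (by simp [hf])]
        rw [ih]
        simp [hf]
    · rw [if_neg (by simp [Ne.symm hs])]
      rw [ih]
      by_cases hf : flag = 0
      · subst hf
        rw [PySem.List.index?_cons_of_ne _ hs]
        cases PySem.List.index? ((lfsr3States g (lfsr3Step s)).drop 1) (41 : Int) with
        | none => simp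
        | some j =>
          simp
          ring
      · simp [hf]

-- ===== VERDICT (by name: the statement is the Claim_ definition above) =====
theorem lfsr3_spec : Claim_equal_lfsr3 := by
  unfold Claim_equal_lfsr3
  intro n _
  unfold Spec_lfsr3 lfsr3 lfsr3_alt
  simp only [lfsr3Loop_eq]
  rw [lfsr3States_cons n.toNat 41]
  simp
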